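-- pv_equiv track=rewrite | github.com/Ang107/kyo_pro | ICPC/20240702/C/main.py | solve
-- ===== SOURCE A (Python) =====
-- import string
--
-- alph_l = tuple(string.ascii_uppercase)
--
-- def solve(n, c):
--     d = {}
--     for i in alph_l:
--         d[i] = 0
--
--     for idx, i in enumerate(c):
--         d[i] += 1
--         tmp = sorted(d.items(), key=lambda x: x[1], reverse=True)
--
--         if tmp[0][1] > tmp[1][1] + n - 1 - idx:
--             return f"{tmp[0][0]} {idx+1}"
--
--     return "TIE"
--
--     pass
-- ===== SOURCE B (Python) =====
-- import string
--
--
-- def solve(n, c):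
--     cnt = [0] * 26
--     for idx, ch in enumerate(c):
--         cnt[ord(ch) - 65] += 1
--         best = second = -1
--         leader = ""
--         for letter, v in zip(string.ascii_uppercase, cnt):
--             if v > best:
--                 second = best
--                 best = v
--                 leader = letter
--             elif v > second:
--                 second = v
--         if best > second + n - 1 - idx:
--             return f"{leader} {idx+1}"
--     return "TIE"
-- ===== Notes on version B (the rewrite author's own statement) =====
-- stated objective: simpler
-- what changed: B drops A's dict and per-step sorted() of the 26 (letter,count) pairs and instead keeps a plain 26-slot count list, finding the leader, the max and the multiplicity-aware second max in one linear A-to-Z scan per step.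
-- outside the precondition, e.g. on solve(3, ['A', 'A', '$']): A returns 'A 2', B returns 'A 2'
import Mathlib
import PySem

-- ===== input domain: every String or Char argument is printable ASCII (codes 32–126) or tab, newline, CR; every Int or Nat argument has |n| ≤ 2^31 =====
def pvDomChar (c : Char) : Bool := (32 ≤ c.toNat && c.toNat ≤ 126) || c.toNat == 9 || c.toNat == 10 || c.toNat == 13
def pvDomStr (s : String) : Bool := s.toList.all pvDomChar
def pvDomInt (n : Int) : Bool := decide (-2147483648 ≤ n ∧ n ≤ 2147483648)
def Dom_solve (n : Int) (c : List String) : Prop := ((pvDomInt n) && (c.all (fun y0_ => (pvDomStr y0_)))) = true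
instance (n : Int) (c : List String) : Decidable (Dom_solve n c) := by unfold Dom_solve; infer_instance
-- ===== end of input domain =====

-- B replaces A's per-step sort of the 26 dict entries by a single linear scan (over zip(alphabet, counts))
-- that keeps the running (best, second-best-with-multiplicity, leader); objective: simpler per-step work, no sort.

-- the module constant alph_l = tuple(string.ascii_uppercase), as the list of 1-character strings
def LETTERS : List String :=
  ["A","B","C","D","E","F","G","H","I","J","K","L","M",
   "N","O","P","Q","R","S","T","U","V","W","X","Y","Z"]

-- ===== PORT A =====
-- the init loop 'for i in alph_l: d[i] = 0'
def initDictA : PySem.Dict String Int :=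
  LETTERS.foldl (fun d i => d.insert i 0) PySem.Dict.empty

-- the 'for idx, i in enumerate(c)' loop; d[i] += 1 is d.modify (exact when i is a key; KeyError
-- otherwise, excluded by Pre_).  tmp always has 26 entries, so tmp[0]/tmp[1] exist; the '_' arm is
-- only the IndexError guard.
def solveLoopA (n : Int) (d : PySem.Dict String Int) (idx : Int) : List String → String
  | [] => "TIE"
  | i :: rest =>
      let d' := d.modify i 0 (· + 1)
      match PySem.List.sorted d'.items (fun x => x.2) true with
      | p0 :: p1 :: _ =>
          if p0.2 > p1.2 + n - 1 - idx then p0.1 ++ " " ++ PySem.Int.toStr (idx + 1)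
          else solveLoopA n d' (idx + 1) rest
      | _ => "TIE"

def solve (n : Int) (c : List String) : String :=
  solveLoopA n initDictA 0 c

-- ===== PORT B =====
-- the inner 'for letter, v in zip(string.ascii_uppercase, cnt)' scan of Source B
def scanLoopB : List (String × Int) → Int → Int → String → Int × Int × String
  | [], best, second, leader => (best, second, leader)
  | (letter, v) :: rest, best, second, leader =>
      if v > best then scanLoopB rest v best letter
      else if v > second then scanLoopB rest best v leader
      else scanLoopB rest best second leader

-- the outer 'for idx, ch in enumerate(c)' loop of Source B; 'ord(ch)' is exact for the 1-character
-- strings Pre_ admits (headD is only the total-function guard); 'cnt[j] += 1' is ported by hand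
-- with Python's negative-index wrap (exact whenever the index is in range, IndexError guard else).
def solveLoopB (n : Int) (cnt : List Int) (idx : Int) : List String → String
  | [] => "TIE"
  | s :: rest =>
      let ji : Int := ((s.toList.headD 'A').toNat : Int) - 65
      let j : Nat := (if ji < 0 then ji + (cnt.length : Int) else ji).toNat
      let cnt' := cnt.set j (cnt.getD j 0 + 1)
      match scanLoopB (LETTERS.zip cnt') (-1) (-1) "" with
      | (best, second, leader) =>
          if best > second + n - 1 - idx then leader ++ " " ++ PySem.Int.toStr (idx + 1)
          else solveLoopB n cnt' (idx + 1) rest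

def solve_alt (n : Int) (c : List String) : String :=
  solveLoopB n (List.replicate 26 0) 0 c

-- ===== PRECONDITION & SPEC =====
-- Pre_ excludes inputs containing a string that is not a single uppercase letter A–Z: on such a
-- string A's 'd[i] += 1' raises KeyError — unless a majority was already clinched strictly before
-- it, in which case both A and B return the same answer (Pre_ is slightly narrower than the raise).
def Pre_solve (n : Int) (c : List String) : Prop := ∀ s ∈ c, s ∈ LETTERS
instance (n : Int) (c : List String) : Decidable (Pre_solve n c) := by unfold Pre_solve; infer_instance

def pvWitness_solve : Int × List String := (3, ["A", "B", "A"])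

def Spec_solve (n : Int) (c : List String) (out : String) : Prop := out = solve_alt n c
instance (n : Int) (c : List String) (out : String) : Decidable (Spec_solve n c out) := by unfold Spec_solve; infer_instance

-- ===== CLAIM (what is proved, stated in full; the proofs are below) =====
def Claim_equal_solve : Prop := ∀ (n : Int) (c : List String), Dom_solve n c → Pre_solve n c → Spec_solve n c (solve n c)

-- ===== LEMMAS AND PROOFS =====

-- ScanRel st acc: the scan state st = (best, second, leader) describes the first two entries of the
-- stably-descending-sorted list acc built so far.
def ScanRel (st : Int × Int × String) (acc : List (String × Int)) : Prop :=
  match acc with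
  | [] => st.1 = -1 ∧ st.2.1 = -1
  | [a] => st.1 = a.2 ∧ st.2.1 = -1 ∧ st.2.2 = a.1
  | a :: b :: _ => st.1 = a.2 ∧ st.2.1 = b.2 ∧ st.2.2 = a.1

theorem rel_step (p : String × Int) (hp : 0 ≤ p.2) (best second : Int) (leader : String)
    (acc : List (String × Int)) (h : ScanRel (best, second, leader) acc) :
    ScanRel (if p.2 > best then (p.2, best, p.1)
         else if p.2 > second then (best, p.2, leader)
         else (best, second, leader))
        (PySem.List.insertBy (fun a b => decide (b.2 < a.2)) p acc) := by
  match acc with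
  | [] =>
      obtain ⟨h1, h2⟩ := h
      try simp only at h1 h2
      subst h1; subst h2
      rw [if_pos (show p.2 > -1 by omega)]
      simp only [PySem.List.insertBy]
      exact ⟨rfl, rfl, rfl⟩
  | [a] =>
      obtain ⟨h1, h2, h3⟩ := h
      try simp only at h1 h2 h3
      subst h1; subst h2; subst h3
      simp only [PySem.List.insertBy, decide_eq_true_eq]
      by_cases hc : a.2 < p.2
      · rw [if_pos hc, if_pos (show p.2 > a.2 from hc)]
        exact ⟨rfl, rfl, rfl⟩
      · rw [if_neg hc, if_neg (show ¬ p.2 > a.2 from hc), if_pos (show p.2 > -1 by omega)]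
        exact ⟨rfl, rfl, rfl⟩
  | a :: b :: t =>
      obtain ⟨h1, h2, h3⟩ := h
      try simp only at h1 h2 h3
      subst h1; subst h2; subst h3
      simp only [PySem.List.insertBy, decide_eq_true_eq]
      by_cases hc : a.2 < p.2
      · rw [if_pos hc, if_pos (show p.2 > a.2 from hc)]
        exact ⟨rfl, rfl, rfl⟩
      · rw [if_neg hc, if_neg (show ¬ p.2 > a.2 from hc)]
        by_cases hc2 : b.2 < p.2
        · rw [if_pos hc2, if_pos (show p.2 > b.2 from hc2)]
          exact ⟨rfl, rfl, rfl⟩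
        · rw [if_neg hc2, if_neg (show ¬ p.2 > b.2 from hc2)]
          cases hins : PySem.List.insertBy (fun a b => decide (b.2 < a.2)) p t with
          | nil => exact ⟨rfl, rfl, rfl⟩
          | cons q u => exact ⟨rfl, rfl, rfl⟩

theorem rel_scan : ∀ (xs : List (String × Int)) (best second : Int) (leader : String)
    (acc : List (String × Int)), (∀ p ∈ xs, 0 ≤ p.2) → ScanRel (best, second, leader) acc →
    ScanRel (scanLoopB xs best second leader)
        (xs.foldl (fun acc x => PySem.List.insertBy (fun a b => decide (b.2 < a.2)) x acc) acc) := by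
  intro xs
  induction xs with
  | nil => intro best second leader acc _ h; simpa [scanLoopB] using h
  | cons p rest ih =>
      intro best second leader acc hnn h
      have hstep := rel_step p (hnn p (by simp)) best second leader acc h
      have hnn' : ∀ q ∈ rest, 0 ≤ q.2 := fun q hq => hnn q (by simp [hq])
      obtain ⟨pl, pv⟩ := p
      simp only [scanLoopB, List.foldl_cons]
      by_cases h1 : pv > best
      · rw [if_pos h1]
        rw [if_pos h1] at hstep
        exact ih pv best pl _ hnn' hstep
      · rw [if_neg h1]
        rw [if_neg h1] at hstep
        by_cases h2 : pv > second
        · rw [if_pos h2]; rw [if_pos h2] at hstep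
          exact ih best pv leader _ hnn' hstep
        · rw [if_neg h2]; rw [if_neg h2] at hstep
          exact ih best second leader _ hnn' hstep

theorem rel_sorted (xs : List (String × Int)) (hnn : ∀ p ∈ xs, 0 ≤ p.2) :
    ScanRel (scanLoopB xs (-1) (-1) "") (PySem.List.sorted xs (fun x => x.2) true) := by
  rw [PySem.List.sorted_rev_eq_foldl_insertBy]
  exact rel_scan xs (-1) (-1) "" [] hnn ⟨rfl, rfl⟩

theorem letters_index : ∀ s ∈ LETTERS, LETTERS[(s.toList.headD 'A').toNat - 65]? = some s := by
  decide

theorem letters_nodup : LETTERS.Nodup := by decide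

theorem letters_ord : ∀ s ∈ LETTERS, 65 ≤ (s.toList.headD 'A').toNat ∧ (s.toList.headD 'A').toNat ≤ 90 := by
  decide

theorem keys_insert_of_contains {κ ν : Type} [BEq κ] [LawfulBEq κ] (d : PySem.Dict κ ν) (k : κ) (v : ν)
    (h : d.contains k = true) : (d.insert k v).keys = d.keys := by
  simp only [PySem.Dict.keys, PySem.Dict.items_insert_of_contains d v h, List.map_map]
  apply List.map_congr_left
  intro p _
  simp only [Function.comp_apply]
  by_cases hp : p.1 == k
  · rw [if_pos hp]
    exact (eq_of_beq hp).symm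
  · rw [if_neg hp]

theorem items_step (d : PySem.Dict String Int) (cnt : List Int) (i : String)
    (hd : d.items = LETTERS.zip cnt) (hlen : cnt.length = 26) (hi : i ∈ LETTERS) :
    (d.modify i 0 (· + 1)).items
      = LETTERS.zip (cnt.set ((i.toList.headD 'A').toNat - 65)
          (cnt.getD ((i.toList.headD 'A').toNat - 65) 0 + 1)) := by
  set j := (i.toList.headD 'A').toNat - 65 with hjdef
  have hj? : LETTERS[j]? = some i := letters_index i hi
  have hjlt : j < 26 := by
    by_contra hcon
    rw [List.getElem?_eq_none (by rw [show LETTERS.length = 26 from by decide]; omega)] at hj?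
    simp at hj?
  have hLlen : LETTERS.length = 26 := by decide
  have hji : LETTERS[j]'(by omega) = i := by
    rw [List.getElem?_eq_getElem (by omega)] at hj?
    exact Option.some.inj hj?
  have hkeys : d.keys = LETTERS := by
    simp only [PySem.Dict.keys, hd]
    exact List.map_fst_zip (by omega)
  have hndk : d.keys.Nodup := by rw [hkeys]; exact letters_nodup
  have hcont : d.contains i = true := by
    rw [PySem.Dict.contains_eq_decide_mem_keys, hkeys]
    simpa using hi
  have hkeys' : (d.modify i 0 (· + 1)).keys = LETTERS := by
    rw [PySem.Dict.keys_modify, keys_insert_of_contains _ _ _ hcont, hkeys]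
  have hndk' : (d.modify i 0 (· + 1)).keys.Nodup := by rw [hkeys']; exact letters_nodup
  have hgetd : ∀ (m : Nat) (hm : m < 26), d.getD (LETTERS[m]'(by omega)) 0 = cnt[m]'(by omega) := by
    intro m hm
    apply PySem.Dict.getD_of_mem_items (d := d) _ hndk
    rw [hd]
    have : (LETTERS.zip cnt)[m]'(by simp [List.length_zip]; omega)
        = (LETTERS[m]'(by omega), cnt[m]'(by omega)) := List.getElem_zip
    rw [← this]
    exact List.getElem_mem _
  have hiff : ∀ (m : Nat) (hm : m < 26), (LETTERS[m]'(by omega) = i) ↔ (j = m) := by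
    intro m hm
    constructor
    · intro he
      have := (List.Nodup.getElem_inj_iff letters_nodup).mp (he.trans hji.symm)
      omega
    · intro he
      subst he
      exact hji
  have hgd : cnt.getD j 0 = cnt[j]'(by omega) := List.getD_eq_getElem cnt 0 (by omega)
  rw [PySem.Dict.items_eq_map_keys _ hndk' 0, hkeys']
  apply List.ext_getElem
  · simp [List.length_zip, hLlen, hlen]
  · intro m hm1 hm2
    have hm : m < 26 := by simpa [hLlen] using hm1
    rw [List.getElem_zip, List.getElem_map, List.getElem_set, PySem.Dict.getD_modify]
    by_cases hcase : j = m
    · subst hcase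
      have h1 := hgetd j hjlt
      rw [hji] at h1
      rw [if_pos hji, if_pos rfl]
      exact congrArg (fun v => (_, v)) (show (d.getD i 0) + 1 = cnt.getD j 0 + 1 by rw [h1, hgd])
    · rw [if_neg (fun he => hcase ((hiff m hm).mp he)), if_neg hcase]
      exact congrArg (fun v => (LETTERS[m]'(by omega), v)) (hgetd m hm)

theorem loop_eq (n : Int) : ∀ (c : List String) (d : PySem.Dict String Int) (cnt : List Int)
    (idx : Int), (∀ s ∈ c, s ∈ LETTERS) → d.items = LETTERS.zip cnt → cnt.length = 26 →
    (∀ v ∈ cnt, 0 ≤ v) → solveLoopA n d idx c = solveLoopB n cnt idx c := by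
  intro c
  induction c with
  | nil => intro d cnt idx _ _ _ _; rfl
  | cons i rest ih =>
      intro d cnt idx hpre hd hlen hnn
      have hi : i ∈ LETTERS := hpre i (by simp)
      obtain ⟨ho1, ho2⟩ := letters_ord i hi
      set j := (i.toList.headD 'A').toNat - 65 with hjdef
      have hjeq : (if (((i.toList.headD 'A').toNat : Int) - 65) < 0 then
            (((i.toList.headD 'A').toNat : Int) - 65) + (cnt.length : Int)
          else (((i.toList.headD 'A').toNat : Int) - 65)).toNat = j := by
        rw [if_neg (by omega)]
        omega
      have hjlt : j < 26 := by
        have hj? := letters_index i hi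
        by_contra hcon
        rw [List.getElem?_eq_none (by rw [show LETTERS.length = 26 from by decide]; omega)] at hj?
        simp at hj?
      set cnt' := cnt.set j (cnt.getD j 0 + 1) with hcnt'def
      have hlen' : cnt'.length = 26 := by simp [hcnt'def, hlen]
      have hnn' : ∀ v ∈ cnt', 0 ≤ v := by
        intro v hv
        rcases List.mem_or_eq_of_mem_set hv with h | h
        · exact hnn v h
        · have : cnt.getD j 0 = cnt[j]'(by omega) := List.getD_eq_getElem cnt 0 (by omega)
          have := hnn (cnt[j]'(by omega)) (List.getElem_mem _)
          omega
      have hitems : (d.modify i 0 (· + 1)).items = LETTERS.zip cnt' :=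
        items_step d cnt i hd hlen hi
      have hznn : ∀ p ∈ LETTERS.zip cnt', 0 ≤ p.2 := by
        intro p hp
        obtain ⟨pl, pv⟩ := p
        exact hnn' pv (List.of_mem_zip hp).2
      have hrel := rel_sorted (LETTERS.zip cnt') hznn
      have hslen : (PySem.List.sorted (LETTERS.zip cnt') (fun x => x.2) true).length = 26 := by
        rw [PySem.List.length_sorted]
        simp [List.length_zip, hlen']
        decide
      obtain ⟨p0, p1, t, hshape⟩ : ∃ p0 p1 t,
          PySem.List.sorted (LETTERS.zip cnt') (fun x => x.2) true = p0 :: p1 :: t := by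
        cases hs : PySem.List.sorted (LETTERS.zip cnt') (fun x => x.2) true with
        | nil => rw [hs] at hslen; simp at hslen
        | cons p0 u =>
            cases u with
            | nil => rw [hs] at hslen; simp at hslen
            | cons p1 t => exact ⟨p0, p1, t, rfl⟩
      rw [hshape] at hrel
      simp only [solveLoopA, solveLoopB]
      rw [hitems, hjeq, ← hcnt'def, hshape]
      rcases hsc : scanLoopB (LETTERS.zip cnt') (-1) (-1) "" with ⟨best, second, leader⟩
      rw [hsc] at hrel
      obtain ⟨e1, e2, e3⟩ := hrel
      try simp only at e1 e2 e3
      subst e1; subst e2; subst e3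
      dsimp only
      by_cases hcond : p0.2 > p1.2 + n - 1 - idx
      · rw [if_pos hcond, if_pos hcond]
      · rw [if_neg hcond, if_neg hcond]
        exact ih _ cnt' (idx + 1) (fun s hs => hpre s (by simp [hs])) hitems hlen' hnn'

theorem init_items : initDictA.items = LETTERS.zip (List.replicate 26 0) := by decide

-- ===== VERDICT (by name: the statement is the Claim_ definition above) =====
theorem solve_spec : Claim_equal_solve := by
  intro n c _ hpre
  unfold Spec_solve solve solve_alt
  exact loop_eq n c initDictA (List.replicate 26 0) 0 hpre init_items (by simp)
    (fun v hv => by rw [List.eq_of_mem_replicate hv])
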